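-- pv_equiv track=rewrite | github.com/AlejandroAlonsoG/phdAlex_data_management | data_ordering/tmp.py | compare_mappings
-- ===== SOURCE A (Python) =====
-- from typing import Dict, Tuple, Optional, List
--
-- def _hex_hamming_distance(h1: str, h2: str) -> Optional[int]:
--     """Compute hamming distance between two hex-encoded hashes.
--
--     Returns None if conversion fails or lengths differ.
--     """
--     try:
--         # Normalize: remove 0x if present and whitespace
--         a = h1.strip().lower().lstrip('0x')
--         b = h2.strip().lower().lstrip('0x')
--         if len(a) != len(b):
--             return None
--         ai = int(a, 16)
--         bi = int(b, 16)
--         x = ai ^ bi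
--         # bit_count available in Python 3.8+
--         return x.bit_count()
--     except Exception:
--         return None
--
-- def compare_mappings(
--     a: Dict[str, Tuple[str, str]],
--     b: Dict[str, Tuple[str, str]],
--     phash_threshold: int = 8,
-- ) -> Tuple[Dict[str, Tuple[str, str]], Dict[str, Tuple[str, str]], List[Tuple[str, str, str, str]]]:
--     """Compare two uuid->(phash,md5) mappings.
--
--     Matching priority: perceptual hash (pHash) exact or near (hamming <= threshold),
--     then md5 exact.
--
--     Returns (unique_in_a, unique_in_b, duplicates) where
--       - unique_in_a/b are dicts of entries present only in that mapping
--       - duplicates is a list of tuples: (uuid_a, uuid_b, match_type, match_value)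
--         where match_type is 'phash_near'|'phash_exact'|'md5'
--     """
--     # Build reverse indexes for b for quick lookup
--     phash_to_uuids_b = {}
--     md5_to_uuids_b = {}
--     for uid, (phash, md5) in b.items():
--         if phash:
--             phash_to_uuids_b.setdefault(phash, []).append(uid)
--         if md5:
--             md5_to_uuids_b.setdefault(md5, []).append(uid)
--
--     matched_b = set()
--     duplicates = []
--
--     for ua, (aphash, amd5) in a.items():
--         found = False
--         # 1) exact phash
--         if aphash and aphash in phash_to_uuids_b:
--             ub = phash_to_uuids_b[aphash][0]
--             duplicates.append((ua, ub, 'phash_exact', aphash))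
--             matched_b.add(ub)
--             found = True
--             continue
--
--         # 2) near phash (hamming)
--         if aphash:
--             for bphash, candidates in phash_to_uuids_b.items():
--                 hd = _hex_hamming_distance(aphash, bphash)
--                 if hd is not None and 0 < hd <= phash_threshold:
--                     ub = candidates[0]
--                     duplicates.append((ua, ub, 'phash_near', f"{aphash}~{bphash} (hd={hd})"))
--                     matched_b.add(ub)
--                     found = True
--                     break
--             if found:
--                 continue
--
--         # 3) md5 exact
--         if amd5 and amd5 in md5_to_uuids_b:
--             ub = md5_to_uuids_b[amd5][0]
--             duplicates.append((ua, ub, 'md5', amd5))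
--             matched_b.add(ub)
--             found = True
--             continue
--
--     # Build uniques
--     unique_in_a = {k: v for k, v in a.items() if all(dup[0] != k for dup in duplicates)}
--     unique_in_b = {k: v for k, v in b.items() if k not in matched_b}
--
--     return unique_in_a, unique_in_b, duplicates
-- ===== SOURCE B (Python) =====
-- from typing import Dict, Tuple, Optional, List
--
-- def _hex_hamming_distance(h1: str, h2: str) -> Optional[int]:
--     """Compute hamming distance between two hex-encoded hashes.
--
--     Returns None if conversion fails or lengths differ.
--     """
--     try:
--         a = h1.strip().lower().lstrip('0x')
--         b = h2.strip().lower().lstrip('0x')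
--         if len(a) != len(b):
--             return None
--         ai = int(a, 16)
--         bi = int(b, 16)
--         x = ai ^ bi
--         return x.bit_count()
--     except Exception:
--         return None
--
-- def compare_mappings(
--     a: Dict[str, Tuple[str, str]],
--     b: Dict[str, Tuple[str, str]],
--     phash_threshold: int = 8,
-- ) -> Tuple[Dict[str, Tuple[str, str]], Dict[str, Tuple[str, str]], List[Tuple[str, str, str, str]]]:
--     """Index-free variant: for each entry of a, one linear pass over b records the
--     first exact-phash hit, the first near-phash hit and the first md5 hit, then the
--     match priority exact > near > md5 decides."""
--     matched_b = set()
--     duplicates = []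
--     for ua, (aphash, amd5) in a.items():
--         exact = near = md5_hit = None
--         for ub, (bphash, bmd5) in b.items():
--             if aphash and bphash:
--                 if exact is None and bphash == aphash:
--                     exact = ub
--                 if near is None:
--                     hd = _hex_hamming_distance(aphash, bphash)
--                     if hd is not None and 0 < hd <= phash_threshold:
--                         near = (ub, bphash, hd)
--             if md5_hit is None and amd5 and bmd5 and bmd5 == amd5:
--                 md5_hit = ub
--         if exact is not None:
--             duplicates.append((ua, exact, 'phash_exact', aphash))
--             matched_b.add(exact)
--         elif near is not None:
--             ub, bphash, hd = near
--             duplicates.append((ua, ub, 'phash_near', f"{aphash}~{bphash} (hd={hd})"))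
--             matched_b.add(ub)
--         elif md5_hit is not None:
--             duplicates.append((ua, md5_hit, 'md5', amd5))
--             matched_b.add(md5_hit)
--     dup_a = {d[0] for d in duplicates}
--     unique_in_a = {k: v for k, v in a.items() if k not in dup_a}
--     unique_in_b = {k: v for k, v in b.items() if k not in matched_b}
--     return unique_in_a, unique_in_b, duplicates
-- ===== Notes on version B (the rewrite author's own statement) =====
-- stated objective: alternative
-- what changed: Removed both phash/md5 reverse-index dicts; B instead makes one linear pass over b per entry of a, recording the first exact-phash, first near-phash and first md5 hit, then applies the same exact > near > md5 priority.
import Mathlib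
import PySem

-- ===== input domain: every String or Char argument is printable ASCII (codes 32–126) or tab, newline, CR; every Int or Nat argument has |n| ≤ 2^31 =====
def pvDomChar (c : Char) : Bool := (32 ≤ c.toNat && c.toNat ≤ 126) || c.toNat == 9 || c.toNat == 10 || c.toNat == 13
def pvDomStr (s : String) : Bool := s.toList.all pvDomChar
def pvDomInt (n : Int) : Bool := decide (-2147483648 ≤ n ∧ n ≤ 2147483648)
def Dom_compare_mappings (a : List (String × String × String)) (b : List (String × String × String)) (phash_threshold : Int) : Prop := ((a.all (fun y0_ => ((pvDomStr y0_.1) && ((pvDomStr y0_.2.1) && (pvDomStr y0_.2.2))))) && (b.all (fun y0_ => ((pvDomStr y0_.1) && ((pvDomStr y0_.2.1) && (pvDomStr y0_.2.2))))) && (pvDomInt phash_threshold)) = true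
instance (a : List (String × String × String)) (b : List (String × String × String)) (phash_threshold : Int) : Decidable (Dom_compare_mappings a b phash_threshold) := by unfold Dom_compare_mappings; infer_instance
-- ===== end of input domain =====

-- B removes A's two reverse indexes and instead does one linear pass over b per entry of a,
-- recording the first exact-phash / near-phash / md5 hit (objective: alternative decomposition, same results).

-- ===== PORT A =====

-- shared helper: Python _hex_hamming_distance (defined in the module and used verbatim by both sources).
-- h.strip().lower().lstrip('0x') → strip, lower, then dropWhile over the char set {'0','x'} (exact);
-- int(s, 16) → PySem.Int.ofCharsBase? _ 16; (ai ^ bi).bit_count() → PySem.Int.bitCount (PySem.Int.bxor ai bi)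
-- (both Python-exact, also on negatives); the try/except returns None exactly where ofCharsBase? is none.
def pvHexHamming (h1 h2 : String) : Option Int :=
  let a := (PySem.Chars.lower (PySem.Chars.strip h1.toList)).dropWhile (fun c => c == '0' || c == 'x')
  let b := (PySem.Chars.lower (PySem.Chars.strip h2.toList)).dropWhile (fun c => c == '0' || c == 'x')
  if a.length ≠ b.length then none
  else match PySem.Int.ofCharsBase? a 16, PySem.Int.ofCharsBase? b 16 with
    | some ai, some bi => some ((PySem.Int.bitCount (PySem.Int.bxor ai bi) : Nat) : Int)
    | _, _ => none

-- A's near-phash `for bphash, candidates in phash_to_uuids_b.items(): ... break` loop: first near key wins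
def pvNearScan (aphash : String) (thr : Int) : List (String × List String) → Option (String × List String × Int)
  | [] => none
  | (bp, cs) :: rest =>
    match pvHexHamming aphash bp with
    | some hd => if 0 < hd ∧ hd ≤ thr then some (bp, cs, hd) else pvNearScan aphash thr rest
    | none => pvNearScan aphash thr rest

-- the body of A's `for ua, (aphash, amd5) in a.items():` loop (state: matched_b, duplicates)
def pvABody (pd md : PySem.Dict String (List String)) (thr : Int)
    (st : PySem.Set String × List (String × String × String × String)) (e : String × String × String) :
    PySem.Set String × List (String × String × String × String) :=
  let ua := e.1
  let aphash := e.2.1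
  let amd5 := e.2.2
  if aphash ≠ "" ∧ pd.contains aphash then
    let ub := (pd.getD aphash []).headD ""    -- candidates[0]; index value lists are nonempty by construction
    (PySem.Set.add st.1 ub, st.2 ++ [(ua, ub, "phash_exact", aphash)])
  else
    match (if aphash ≠ "" then pvNearScan aphash thr pd.items else none) with
    | some (bp, cs, hd) =>
      let ub := cs.headD ""                   -- candidates[0], as above
      (PySem.Set.add st.1 ub, st.2 ++ [(ua, ub, "phash_near", aphash ++ "~" ++ bp ++ " (hd=" ++ PySem.Int.toStr hd ++ ")")])
    | none =>
      if amd5 ≠ "" ∧ md.contains amd5 then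
        let ub := (md.getD amd5 []).headD ""
        (PySem.Set.add st.1 ub, st.2 ++ [(ua, ub, "md5", amd5)])
      else st

-- `d.setdefault(k, []).append(u)` as read-extend-store: d[k] = d.get(k, []) + [u]
def compare_mappings (a : List (String × String × String)) (b : List (String × String × String)) (phash_threshold : Int) : (List (String × String × String)) × (List (String × String × String)) × (List (String × String × String × String)) :=
  let idxs : PySem.Dict String (List String) × PySem.Dict String (List String) :=
    b.foldl (fun (ds : PySem.Dict String (List String) × PySem.Dict String (List String)) f =>
      let pd := if f.2.1 ≠ "" then ds.1.insert f.2.1 (ds.1.getD f.2.1 [] ++ [f.1]) else ds.1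
      let md := if f.2.2 ≠ "" then ds.2.insert f.2.2 (ds.2.getD f.2.2 [] ++ [f.1]) else ds.2
      (pd, md)) (PySem.Dict.empty, PySem.Dict.empty)
  let st := a.foldl (pvABody idxs.1 idxs.2 phash_threshold) (PySem.Set.empty, [])
  let unique_in_a := a.filter (fun e => st.2.all (fun d => d.1 ≠ e.1))
  let unique_in_b := b.filter (fun e => ¬ PySem.Set.contains st.1 e.1)
  (unique_in_a, unique_in_b, st.2)

-- ===== PORT B =====

-- B's single pass over b.items(): the three "first hit" registers (exact, near, md5)
def pvBScan (ap am : String) (thr : Int) (b : List (String × String × String)) :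
    Option String × Option (String × String × Int) × Option String :=
  b.foldl (fun (h : Option String × Option (String × String × Int) × Option String) f =>
    let (ub, bphash, bmd5) := f
    let ex := if h.1.isNone ∧ ap ≠ "" ∧ bphash ≠ "" ∧ bphash = ap then some ub else h.1
    let nr := if h.2.1.isNone ∧ ap ≠ "" ∧ bphash ≠ "" then
                match pvHexHamming ap bphash with
                | some hd => if 0 < hd ∧ hd ≤ thr then some (ub, bphash, hd) else h.2.1
                | none => h.2.1
              else h.2.1
    let m5 := if h.2.2.isNone ∧ am ≠ "" ∧ bmd5 ≠ "" ∧ bmd5 = am then some ub else h.2.2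
    (ex, nr, m5)) (none, none, none)

-- the body of B's outer loop: scan b once, then priority exact > near > md5
def pvBBody (b : List (String × String × String)) (thr : Int)
    (st : PySem.Set String × List (String × String × String × String)) (e : String × String × String) :
    PySem.Set String × List (String × String × String × String) :=
  let ua := e.1
  let aphash := e.2.1
  let amd5 := e.2.2
  match pvBScan aphash amd5 thr b with
  | (some ub, _, _) => (PySem.Set.add st.1 ub, st.2 ++ [(ua, ub, "phash_exact", aphash)])
  | (none, some (ub, bp, hd), _) => (PySem.Set.add st.1 ub, st.2 ++ [(ua, ub, "phash_near", aphash ++ "~" ++ bp ++ " (hd=" ++ PySem.Int.toStr hd ++ ")")])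
  | (none, none, some ub) => (PySem.Set.add st.1 ub, st.2 ++ [(ua, ub, "md5", amd5)])
  | (none, none, none) => st

def compare_mappings_alt (a : List (String × String × String)) (b : List (String × String × String)) (phash_threshold : Int) : (List (String × String × String)) × (List (String × String × String)) × (List (String × String × String × String)) :=
  let st := a.foldl (pvBBody b phash_threshold) (PySem.Set.empty, [])
  let dupA : PySem.Set String := PySem.Set.ofList (st.2.map (fun d => d.1))
  let unique_in_a := a.filter (fun e => ¬ PySem.Set.contains dupA e.1)
  let unique_in_b := b.filter (fun e => ¬ PySem.Set.contains st.1 e.1)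
  (unique_in_a, unique_in_b, st.2)

-- ===== PRECONDITION & SPEC =====
def Spec_compare_mappings (a : List (String × String × String)) (b : List (String × String × String)) (phash_threshold : Int) (out : (List (String × String × String)) × (List (String × String × String)) × (List (String × String × String × String))) : Prop := out = compare_mappings_alt a b phash_threshold
instance (a : List (String × String × String)) (b : List (String × String × String)) (phash_threshold : Int) (out : (List (String × String × String)) × (List (String × String × String)) × (List (String × String × String × String))) : Decidable (Spec_compare_mappings a b phash_threshold out) := by unfold Spec_compare_mappings; infer_instance

-- ===== CLAIM (what is proved, stated in full; the proofs are below) =====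
def Claim_equal_compare_mappings : Prop := ∀ (a : List (String × String × String)) (b : List (String × String × String)) (phash_threshold : Int), Dom_compare_mappings a b phash_threshold → Spec_compare_mappings a b phash_threshold (compare_mappings a b phash_threshold)

-- ===== LEMMAS AND PROOFS =====

-- proof-side name for the reverse index A builds (one per hash field, key function g)
def pvIdx (g : String × String × String → String) (b : List (String × String × String)) : PySem.Dict String (List String) :=
  b.foldl (fun d f => if g f ≠ "" then d.insert (g f) (d.getD (g f) [] ++ [f.1]) else d) PySem.Dict.empty

-- proof-side names for the three "first hit" scans of B
def pvHEx (ap : String) (f : String × String × String) : Option String :=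
  if ap ≠ "" ∧ f.2.1 ≠ "" ∧ f.2.1 = ap then some f.1 else none
def pvHNr (ap : String) (thr : Int) (f : String × String × String) : Option (String × String × Int) :=
  if ap ≠ "" ∧ f.2.1 ≠ "" then
    match pvHexHamming ap f.2.1 with
    | some hd => if 0 < hd ∧ hd ≤ thr then some (f.1, f.2.1, hd) else none
    | none => none
  else none
def pvHMd (am : String) (f : String × String × String) : Option String :=
  if am ≠ "" ∧ f.2.2 ≠ "" ∧ f.2.2 = am then some f.1 else none

def pvProj (r : String × List String × Int) : String × String × Int := (r.2.1.headD "", r.1, r.2.2)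

-- A's pair-of-dicts fold is the pair of the two pvIdx folds
lemma pvIdx_pair_aux (b : List (String × String × String)) :
    ∀ (d1 d2 : PySem.Dict String (List String)),
    b.foldl (fun (ds : PySem.Dict String (List String) × PySem.Dict String (List String)) f =>
      let pd := if f.2.1 ≠ "" then ds.1.insert f.2.1 (ds.1.getD f.2.1 [] ++ [f.1]) else ds.1
      let md := if f.2.2 ≠ "" then ds.2.insert f.2.2 (ds.2.getD f.2.2 [] ++ [f.1]) else ds.2
      (pd, md)) (d1, d2)
    = (b.foldl (fun d f => if f.2.1 ≠ "" then d.insert f.2.1 (d.getD f.2.1 [] ++ [f.1]) else d) d1,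
       b.foldl (fun d f => if f.2.2 ≠ "" then d.insert f.2.2 (d.getD f.2.2 [] ++ [f.1]) else d) d2) := by
  induction b with
  | nil => intro d1 d2; rfl
  | cons x xs ih =>
    intro d1 d2
    simp only [List.foldl_cons]
    exact ih _ _

lemma pvIdx_pair (b : List (String × String × String)) :
    b.foldl (fun (ds : PySem.Dict String (List String) × PySem.Dict String (List String)) f =>
      let pd := if f.2.1 ≠ "" then ds.1.insert f.2.1 (ds.1.getD f.2.1 [] ++ [f.1]) else ds.1
      let md := if f.2.2 ≠ "" then ds.2.insert f.2.2 (ds.2.getD f.2.2 [] ++ [f.1]) else ds.2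
      (pd, md)) (PySem.Dict.empty, PySem.Dict.empty)
    = (pvIdx (fun f => f.2.1) b, pvIdx (fun f => f.2.2) b) := by
  exact pvIdx_pair_aux b PySem.Dict.empty PySem.Dict.empty

lemma pvIdx_append (g : String × String × String → String) (b : List (String × String × String)) (f : String × String × String) :
    pvIdx g (b ++ [f]) = if g f ≠ "" then (pvIdx g b).insert (g f) ((pvIdx g b).getD (g f) [] ++ [f.1]) else pvIdx g b := by
  simp [pvIdx, List.foldl_append]

lemma pvIdx_nodup_keys (g : String × String × String → String) (b : List (String × String × String)) :
    (pvIdx g b).keys.Nodup := by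
  induction b using List.reverseRecOn with
  | nil => simp [pvIdx, PySem.Dict.keys_empty]
  | append_singleton b f ih =>
    rw [pvIdx_append]
    split
    · exact PySem.Dict.nodup_keys_insert _ _ _ ih
    · exact ih

lemma pvIdx_val_ne_nil (g : String × String × String → String) (b : List (String × String × String))
    (k : String) (v : List String) (h : (k, v) ∈ (pvIdx g b).items) : v ≠ [] := by
  induction b using List.reverseRecOn generalizing k v with
  | nil => simp [pvIdx, PySem.Dict.empty] at h
  | append_singleton b f ih =>
    rw [pvIdx_append] at h
    split at h
    · rcases (PySem.Dict.mem_items_insert _ _ _ _).mp h with h | ⟨h, _⟩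
      · simp only [Prod.mk.injEq] at h
        rcases h with ⟨h1, h2⟩
        subst h2; simp
      · exact ih _ _ h
    · exact ih _ _ h

lemma pvIdx_getD_ne_nil (g : String × String × String → String) (b : List (String × String × String))
    (k : String) (h : (pvIdx g b).contains k = true) : (pvIdx g b).getD k [] ≠ [] := by
  rcases ((PySem.Dict.contains_iff_mem_keys _ _).mp h) with hk
  have hkeys : k ∈ ((pvIdx g b).items.map (fun p => p.1)) := by
    simpa [PySem.Dict.keys] using hk
  rcases List.mem_map.mp hkeys with ⟨p, hp, hp1⟩
  obtain ⟨k', v⟩ := p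
  simp only at hp1
  subst hp1
  rw [PySem.Dict.getD_of_mem_items _ hp (pvIdx_nodup_keys g b)]
  exact pvIdx_val_ne_nil g b _ _ hp

lemma pvIdx_key_mem (g : String × String × String → String) (b : List (String × String × String))
    (k : String) (h : k ∈ (pvIdx g b).keys) : ∃ f ∈ b, g f = k ∧ g f ≠ "" := by
  induction b using List.reverseRecOn with
  | nil => simp [pvIdx, PySem.Dict.keys_empty] at h
  | append_singleton b f ih =>
    rw [pvIdx_append] at h
    split at h
    · rcases (PySem.Dict.mem_keys_insert _ _ _ _).mp h with h | h
      · subst h; exact ⟨f, by simp, rfl, by assumption⟩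
      · rcases ih h with ⟨f', hf', h1, h2⟩
        exact ⟨f', by simp [hf'], h1, h2⟩
    · rcases ih h with ⟨f', hf', h1, h2⟩
      exact ⟨f', by simp [hf'], h1, h2⟩

lemma pvNearScan_append (ap : String) (thr : Int) (l r : List (String × List String)) :
    pvNearScan ap thr (l ++ r) = (pvNearScan ap thr l).or (pvNearScan ap thr r) := by
  induction l with
  | nil => simp [pvNearScan]
  | cons p rest ih =>
    obtain ⟨bp, cs⟩ := p
    simp only [List.cons_append, pvNearScan]
    rcases pvHexHamming ap bp with _ | hd <;> simp only [ih]
    split <;> simp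

lemma pvNearScan_congr (ap : String) (thr : Int) (l l' : List (String × List String))
    (h : List.Forall₂ (fun p q => p.1 = q.1 ∧ p.2.headD "" = q.2.headD "") l l') :
    (pvNearScan ap thr l).map pvProj = (pvNearScan ap thr l').map pvProj := by
  induction h with
  | nil => rfl
  | cons hpq hrest ih =>
    rename_i p q rest rest'
    obtain ⟨bp, cs⟩ := p
    obtain ⟨bq, cq⟩ := q
    obtain ⟨h1, h2⟩ := hpq
    simp only at h1 h2
    subst h1
    simp only [pvNearScan]
    rcases hx : pvHexHamming ap bp with _ | hd
    · simp only [hx]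
      exact ih
    · simp only [hx]
      split
      · simp only [Option.map_some, pvProj]
        simpa [Prod.ext_iff] using h2
      · exact ih

-- A's index lookup (exact phash, and md5) is the first hit over b
lemma pvA_first (g : String × String × String → String) (b : List (String × String × String))
    (key : String) (hkey : key ≠ "") :
    (if (pvIdx g b).contains key then some (((pvIdx g b).getD key []).headD "") else none)
    = b.findSome? (fun f => if g f ≠ "" ∧ g f = key then some f.1 else none) := by
  induction b using List.reverseRecOn with
  | nil => simp [pvIdx, PySem.Dict.contains_empty]
  | append_singleton b f ih =>
    rw [List.findSome?_append, ← ih, pvIdx_append]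
    by_cases hg : g f ≠ ""
    · rw [if_pos hg]
      by_cases heq : g f = key
      · subst heq
        rw [PySem.Dict.contains_insert]
        simp only [BEq.rfl, Bool.true_or]
        rw [PySem.Dict.getD_insert, if_pos (Eq.refl (g f))]
        by_cases hc : (pvIdx g b).contains (g f) = true
        · rw [if_pos hc]
          have hne := pvIdx_getD_ne_nil g b (g f) hc
          rcases hv : (pvIdx g b).getD (g f) [] with _ | ⟨v0, vs⟩
          · exact absurd hv hne
          · simp
        · rw [if_neg hc, PySem.Dict.getD_of_not_contains _ _ (by simpa using hc)]
          simp [hg]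
      · rw [PySem.Dict.contains_insert, PySem.Dict.getD_insert]
        have hbe : (key == g f) = false := by
          simp only [beq_eq_false_iff_ne, ne_eq]
          exact fun h => heq h.symm
        have hfn : (fun f => if g f ≠ "" ∧ g f = key then some f.1 else none) f = none := by
          simp [heq]
        simp only [hbe, Bool.false_or, if_neg (show ¬ key = g f from fun h => heq h.symm),
          List.findSome?_singleton, hfn, Option.or_none]
    · rw [if_neg hg]
      simp only [ne_eq, Decidable.not_not] at hg
      have hfn : (fun f => if g f ≠ "" ∧ g f = key then some f.1 else none) f = none := by
        simp [hg]
      simp only [List.findSome?_singleton, hfn, Option.or_none]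

lemma pvA_nr_aux (g : String × String × String → String) (b : List (String × String × String))
    (ap : String) (thr : Int) :
    (pvNearScan ap thr (pvIdx g b).items).map pvProj
    = b.findSome? (fun f => if g f ≠ "" then
        match pvHexHamming ap (g f) with
        | some hd => if 0 < hd ∧ hd ≤ thr then some (f.1, g f, hd) else none
        | none => none
      else none) := by
  induction b using List.reverseRecOn with
  | nil => simp [pvIdx, PySem.Dict.empty, pvNearScan]
  | append_singleton b f ih =>
    rw [List.findSome?_append, ← ih, pvIdx_append, List.findSome?_singleton]
    by_cases hg : g f ≠ ""
    · rw [if_pos hg]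
      by_cases hc : (pvIdx g b).contains (g f) = true
      · rw [PySem.Dict.items_insert_of_contains _ _ hc]
        have hcongr : (pvNearScan ap thr ((pvIdx g b).items.map
            (fun p => if (p.1 == g f) = true then (g f, (pvIdx g b).getD (g f) [] ++ [f.1]) else p))).map pvProj
            = (pvNearScan ap thr (pvIdx g b).items).map pvProj := by
          apply pvNearScan_congr
          rw [List.forall₂_map_left_iff, List.forall₂_same]
          intro p hp
          obtain ⟨pk, pv⟩ := p
          by_cases hpk : (pk == g f) = true
          · have hpe : pk = g f := by simpa using hpk
            subst hpe
            have hold : (pvIdx g b).getD (g f) [] = pv :=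
              PySem.Dict.getD_of_mem_items _ hp (pvIdx_nodup_keys g b) []
            have hnn : pv ≠ [] := pvIdx_val_ne_nil g b _ _ hp
            simp only [hpk, if_pos]
            refine ⟨trivial, ?_⟩
            rw [hold]
            rcases pv with _ | ⟨v0, vs⟩
            · exact absurd rfl hnn
            · simp
          · simp [hpk]
        rw [hcongr, ih]
        rcases hfv : (if g f ≠ "" then
            match pvHexHamming ap (g f) with
            | some hd => if 0 < hd ∧ hd ≤ thr then some (f.1, g f, hd) else none
            | none => none
          else none) with _ | v
        · rw [hfv, Option.or_none]
        · have hmem : g f ∈ (pvIdx g b).keys := (PySem.Dict.contains_iff_mem_keys _ _).mp hc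
          rcases pvIdx_key_mem g b _ hmem with ⟨f', hf', hgf', _⟩
          rcases hXv : List.findSome? (fun f => if g f ≠ "" then
              match pvHexHamming ap (g f) with
              | some hd => if 0 < hd ∧ hd ≤ thr then some (f.1, g f, hd) else none
              | none => none
            else none) b with _ | xv
          · exfalso
            have hthis := (List.findSome?_eq_none_iff.mp hXv) f' hf'
            rw [hgf'] at hthis
            rw [if_pos hg] at hthis hfv
            rcases hhx : pvHexHamming ap (g f) with _ | hd
            · rw [hhx] at hfv; simp at hfv
            · simp only [hhx] at hthis hfv
              by_cases hcnd : 0 < hd ∧ hd ≤ thr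
              · rw [if_pos hcnd] at hthis; cases hthis
              · rw [if_neg hcnd] at hfv; cases hfv
          · rfl
      · rw [PySem.Dict.items_insert_of_not_contains _ _ (by simpa using hc)]
        rw [PySem.Dict.getD_of_not_contains _ _ (by simpa using hc)]
        rw [pvNearScan_append, Option.map_or, ih]
        congr 1
        simp only [pvNearScan]
        rcases pvHexHamming ap (g f) with _ | hd <;> simp only [if_pos hg]
        · simp
        · split <;> simp [pvProj]
    · rw [if_neg hg]
      simp only [ne_eq, Decidable.not_not] at hg
      simp [hg, Option.or_none]

lemma pvA_ex (b : List (String × String × String)) (ap : String) :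
    (if ap ≠ "" ∧ (pvIdx (fun f => f.2.1) b).contains ap then some (((pvIdx (fun f => f.2.1) b).getD ap []).headD "") else none)
    = b.findSome? (pvHEx ap) := by
  by_cases hap : ap ≠ ""
  · have h := pvA_first (fun f => f.2.1) b ap hap
    have hfun : (fun f : String × String × String => if f.2.1 ≠ "" ∧ f.2.1 = ap then some f.1 else none) = pvHEx ap := by
      funext f
      simp [pvHEx, hap]
    rw [← hfun, ← h]
    by_cases hc : (pvIdx (fun f => f.2.1) b).contains ap = true <;> simp [hc, hap]
  · simp only [ne_eq, Decidable.not_not] at hap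
    subst hap
    rw [if_neg (by simp)]
    symm
    rw [List.findSome?_eq_none_iff]
    intro x hx
    simp [pvHEx]

lemma pvA_md (b : List (String × String × String)) (am : String) :
    (if am ≠ "" ∧ (pvIdx (fun f => f.2.2) b).contains am then some (((pvIdx (fun f => f.2.2) b).getD am []).headD "") else none)
    = b.findSome? (pvHMd am) := by
  by_cases ham : am ≠ ""
  · have h := pvA_first (fun f => f.2.2) b am ham
    have hfun : (fun f : String × String × String => if f.2.2 ≠ "" ∧ f.2.2 = am then some f.1 else none) = pvHMd am := by
      funext f
      simp [pvHMd, ham]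
    rw [← hfun, ← h]
    by_cases hc : (pvIdx (fun f => f.2.2) b).contains am = true <;> simp [hc, ham]
  · simp only [ne_eq, Decidable.not_not] at ham
    subst ham
    rw [if_neg (by simp)]
    symm
    rw [List.findSome?_eq_none_iff]
    intro x hx
    simp [pvHMd]

lemma pvA_nr (b : List (String × String × String)) (ap : String) (thr : Int) :
    ((if ap ≠ "" then pvNearScan ap thr (pvIdx (fun f => f.2.1) b).items else none).map pvProj)
    = b.findSome? (pvHNr ap thr) := by
  by_cases hap : ap ≠ ""
  · rw [if_pos hap, pvA_nr_aux]
    congr 1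
    funext f
    simp [pvHNr, hap]
  · simp only [ne_eq, Decidable.not_not] at hap
    subst hap
    rw [if_neg (by simp), Option.map_none]
    symm
    rw [List.findSome?_eq_none_iff]
    intro x hx
    simp [pvHNr]

-- a "first hit" register fold is findSome?
lemma pvFoldl_first {a b : Type} (upd : Option b → a → Option b) (h : a → Option b)
    (h1 : ∀ v x, upd (some v) x = some v) (h2 : ∀ x, upd none x = h x)
    (l : List a) : ∀ (s : Option b), l.foldl upd s = s.or (l.findSome? h) := by
  induction l with
  | nil => intro s; cases s <;> simp
  | cons x xs ih =>
    intro s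
    cases s with
    | some v => simp [List.foldl_cons, h1, ih, List.findSome?_cons]
    | none =>
      simp only [List.foldl_cons, h2, ih, List.findSome?_cons, Option.none_or]
      cases hx : h x <;> simp

-- B's inner fold maintains three independent registers
lemma pvBfold_split (ap am : String) (thr : Int) (l : List (String × String × String)) :
    ∀ (s1 : Option String) (s2 : Option (String × String × Int)) (s3 : Option String),
    l.foldl (fun (h : Option String × Option (String × String × Int) × Option String) f =>
          let (ub, bphash, bmd5) := f
          let ex := if h.1.isNone ∧ ap ≠ "" ∧ bphash ≠ "" ∧ bphash = ap then some ub else h.1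
          let nr := if h.2.1.isNone ∧ ap ≠ "" ∧ bphash ≠ "" then
                      match pvHexHamming ap bphash with
                      | some hd => if 0 < hd ∧ hd ≤ thr then some (ub, bphash, hd) else h.2.1
                      | none => h.2.1
                    else h.2.1
          let m5 := if h.2.2.isNone ∧ am ≠ "" ∧ bmd5 ≠ "" ∧ bmd5 = am then some ub else h.2.2
          (ex, nr, m5)) (s1, s2, s3)
    = (l.foldl (fun s f => if s.isNone ∧ ap ≠ "" ∧ f.2.1 ≠ "" ∧ f.2.1 = ap then some f.1 else s) s1,
       l.foldl (fun s f => if s.isNone ∧ ap ≠ "" ∧ f.2.1 ≠ "" then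
                      match pvHexHamming ap f.2.1 with
                      | some hd => if 0 < hd ∧ hd ≤ thr then some (f.1, f.2.1, hd) else s
                      | none => s
                    else s) s2,
       l.foldl (fun s f => if s.isNone ∧ am ≠ "" ∧ f.2.2 ≠ "" ∧ f.2.2 = am then some f.1 else s) s3) := by
  induction l with
  | nil => intro s1 s2 s3; rfl
  | cons x xs ih =>
    intro s1 s2 s3
    obtain ⟨ub, bp, bm⟩ := x
    simp only [List.foldl_cons]
    exact ih _ _ _

-- B's single pass over b computes the three first-hit scans
lemma pvBScan_eq (ap am : String) (thr : Int) (b : List (String × String × String)) :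
    pvBScan ap am thr b = (b.findSome? (pvHEx ap), b.findSome? (pvHNr ap thr), b.findSome? (pvHMd am)) := by
  unfold pvBScan
  rw [pvBfold_split]
  have e1 := pvFoldl_first (fun s f => if s.isNone ∧ ap ≠ "" ∧ f.2.1 ≠ "" ∧ f.2.1 = ap then some f.1 else s)
    (pvHEx ap) (by intro v x; simp) (by intro x; simp [pvHEx]) b none
  have e2 := pvFoldl_first (fun s f => if s.isNone ∧ ap ≠ "" ∧ f.2.1 ≠ "" then
                      match pvHexHamming ap f.2.1 with
                      | some hd => if 0 < hd ∧ hd ≤ thr then some (f.1, f.2.1, hd) else s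
                      | none => s
                    else s)
    (pvHNr ap thr) (by intro v x; simp)
    (by intro x
        simp only [Option.isNone_none, true_and, pvHNr]) b none
  have e3 := pvFoldl_first (fun s f => if s.isNone ∧ am ≠ "" ∧ f.2.2 ≠ "" ∧ f.2.2 = am then some f.1 else s)
    (pvHMd am) (by intro v x; simp) (by intro x; simp [pvHMd]) b none
  rw [Option.none_or] at e1 e2 e3
  rw [e1, e2, e3]

-- the two per-entry loop bodies agree
lemma pvBody_eq (b : List (String × String × String)) (thr : Int)
    (st : PySem.Set String × List (String × String × String × String)) (e : String × String × String) :
    pvABody (pvIdx (fun f => f.2.1) b) (pvIdx (fun f => f.2.2) b) thr st e = pvBBody b thr st e := by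
  simp only [pvABody, pvBBody]
  rw [pvBScan_eq]
  set ua := e.1
  set ap := e.2.1
  set am := e.2.2
  have hEx := pvA_ex b ap
  have hNr := pvA_nr b ap thr
  have hMd := pvA_md b am
  rcases hex : b.findSome? (pvHEx ap) with _ | u <;> rw [hex] at hEx
  · -- no exact hit: A's first condition is false
    have hC : ¬ (ap ≠ "" ∧ (pvIdx (fun f => f.2.1) b).contains ap = true) := by
      intro h; rw [if_pos h] at hEx; cases hEx
    rw [if_neg (by simpa using hC)]
    rcases hnr : b.findSome? (pvHNr ap thr) with _ | v <;> rw [hnr] at hNr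
    · -- no near hit either: A's scan returns none
      rw [Option.map_eq_none_iff.mp hNr]
      rcases hmd : b.findSome? (pvHMd am) with _ | w <;> rw [hmd] at hMd
      · have hC2 : ¬ (am ≠ "" ∧ (pvIdx (fun f => f.2.2) b).contains am = true) := by
          intro h; rw [if_pos h] at hMd; cases hMd
        rw [if_neg (by simpa using hC2)]
      · by_cases hC2 : am ≠ "" ∧ (pvIdx (fun f => f.2.2) b).contains am = true
        · rw [if_pos hC2] at hMd ⊢
          injection hMd with hw
          rw [hw]
        · rw [if_neg hC2] at hMd; cases hMd
    · -- near hit: A's scan returns the same triple up to pvProj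
      rcases hsc : (if ap ≠ "" then pvNearScan ap thr (pvIdx (fun f => f.2.1) b).items else none) with _ | r
      · rw [hsc] at hNr; cases hNr
      · rw [hsc] at hNr
        obtain ⟨bp, cs, hd⟩ := r
        obtain ⟨v1, v2, v3⟩ := v
        injection hNr with hpr
        simp only [pvProj, Prod.mk.injEq] at hpr
        rcases hpr with ⟨h1, h2, h3⟩
        subst h1; subst h2; subst h3
        rfl
  · -- exact hit
    by_cases hC : ap ≠ "" ∧ (pvIdx (fun f => f.2.1) b).contains ap = true
    · rw [if_pos hC] at hEx ⊢
      injection hEx with hu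
      rw [hu]
    · rw [if_neg hC] at hEx; cases hEx

-- unique_in_a: "no duplicate mentions k" is "k not in the set of duplicate keys"
lemma pvAll_eq_contains (dups : List (String × String × String × String)) (k : String) :
    (dups.all fun d => decide (d.1 ≠ k)) = !(PySem.Set.contains (PySem.Set.ofList (dups.map (fun d => d.1))) k) := by
  have h1 : (PySem.Set.contains (PySem.Set.ofList (dups.map (fun d => d.1))) k) = (dups.map (fun d => d.1)).contains k := by
    simp only [PySem.Set.contains]
    rw [Bool.eq_iff_iff]
    simp only [List.contains_iff_mem]
    exact PySem.Set.mem_ofList _ _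
  rw [h1, Bool.eq_iff_iff]
  simp only [List.all_eq_true, Bool.not_eq_true', decide_eq_true_eq]
  constructor
  · intro h
    rw [← Bool.not_eq_true, List.contains_iff_mem]
    rintro hk
    rcases List.mem_map.mp hk with ⟨d, hd, hdk⟩
    exact h d hd hdk
  · intro h d hd hdk
    rw [← Bool.not_eq_true, List.contains_iff_mem] at h
    exact h (List.mem_map.mpr ⟨d, hd, hdk⟩)

theorem compare_mappings_spec : Claim_equal_compare_mappings := by
  intro a b thr hdom
  unfold Spec_compare_mappings
  unfold compare_mappings compare_mappings_alt
  rw [pvIdx_pair]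
  have hbody : pvABody (pvIdx (fun f => f.2.1) b) (pvIdx (fun f => f.2.2) b) thr = pvBBody b thr := by
    funext st e
    exact pvBody_eq b thr st e
  simp only [hbody]
  apply Prod.ext
  · apply List.filter_congr
    intro e he
    rw [pvAll_eq_contains]
    simp
  · rfl
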